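-- pv_equiv track=rewrite | github.com/hitbox/scratch | adventofcode/aoc2021/day13.py | render_dotcoords
-- ===== SOURCE A (Python) =====
-- def maximums(dotcoords):
--     maxx = max(x for x, y in dotcoords)
--     maxy = max(y for x, y in dotcoords)
--     return (maxx, maxy)
--
-- def render_dotcoords(dotcoords, emptychar='.'):
--     maxx, maxy = maximums(dotcoords)
--     lines = []
--     # +1 because zero is a position
--     for y in range(maxy+1):
--         line = ''
--         for x in range(maxx+1):
--             line += '#' if (x,y) in dotcoords else emptychar
--         lines.append(line)
--     s = '\n'.join(lines)
--     return s
-- ===== SOURCE B (Python) =====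
-- def render_dotcoords(dotcoords, emptychar='.'):
--     maxx = max(x for x, y in dotcoords)
--     maxy = max(y for x, y in dotcoords)
--     grid = [[emptychar] * (maxx + 1) for _ in range(maxy + 1)]
--     for x, y in dotcoords:
--         if 0 <= x and 0 <= y:
--             grid[y][x] = '#'
--     return '\n'.join(''.join(row) for row in grid)
-- ===== Notes on version B (the rewrite author's own statement) =====
-- stated objective: alternative
-- what changed: Instead of scanning dotcoords for membership at every grid cell, B allocates the grid once and writes '#' by direct indexing for each dot, then joins rows.
import Mathlib
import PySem

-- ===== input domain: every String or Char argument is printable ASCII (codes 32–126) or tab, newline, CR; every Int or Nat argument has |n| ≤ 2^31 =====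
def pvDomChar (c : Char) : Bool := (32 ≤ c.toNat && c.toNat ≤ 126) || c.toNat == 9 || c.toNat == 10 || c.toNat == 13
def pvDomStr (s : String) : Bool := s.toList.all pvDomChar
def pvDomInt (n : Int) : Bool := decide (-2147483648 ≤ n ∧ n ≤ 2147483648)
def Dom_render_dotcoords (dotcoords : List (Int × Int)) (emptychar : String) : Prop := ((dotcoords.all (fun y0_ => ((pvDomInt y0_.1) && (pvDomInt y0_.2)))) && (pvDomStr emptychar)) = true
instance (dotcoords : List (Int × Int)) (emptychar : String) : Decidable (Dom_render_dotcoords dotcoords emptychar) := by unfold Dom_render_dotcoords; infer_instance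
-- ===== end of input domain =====

-- B allocates the grid once and writes '#' per dot by direct indexing instead of scanning dotcoords at every cell.
-- ===== PORT A =====
-- maximums(dotcoords): max of the x's and max of the y's (Python max raises ValueError on [], hence the Option)
def maximums (dotcoords : List (Int × Int)) : Option (Int × Int) :=
  match PySem.List.max? (dotcoords.map (fun p => p.1)) (fun v => v),
        PySem.List.max? (dotcoords.map (fun p => p.2)) (fun v => v) with
  | some maxx, some maxy => some (maxx, maxy)
  | _, _ => none

def render_dotcoords (dotcoords : List (Int × Int)) (emptychar : String) : String :=
  match maximums dotcoords with
  | none => ""  -- unreachable under Pre_ (Python raises ValueError)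
  | some (maxx, maxy) =>
    let lines : List String :=
      (PySem.List.pyRange 0 (maxy + 1) 1).foldl (fun lines y =>
        let line : String :=
          (PySem.List.pyRange 0 (maxx + 1) 1).foldl (fun line x =>
            line ++ (if (x, y) ∈ dotcoords then "#" else emptychar)) ""
        lines ++ [line]) []
    PySem.Str.join "\n" lines

-- ===== PORT B =====
-- the body of B's for-loop: grid[y][x] = '#' guarded by 0 <= x and 0 <= y
def gridStep (g : List (List String)) (p : Int × Int) : List (List String) :=
  if 0 ≤ p.1 ∧ 0 ≤ p.2 then
    g.set p.2.toNat ((g.getD p.2.toNat []).set p.1.toNat "#")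
  else g

def render_dotcoords_alt (dotcoords : List (Int × Int)) (emptychar : String) : String :=
  match PySem.List.max? (dotcoords.map (fun p => p.1)) (fun v => v),
        PySem.List.max? (dotcoords.map (fun p => p.2)) (fun v => v) with
  | some maxx, some maxy =>
    let grid : List (List String) :=
      List.replicate (maxy + 1).toNat (List.replicate (maxx + 1).toNat emptychar)
    let grid := dotcoords.foldl gridStep grid
    PySem.Str.join "\n" (grid.map (fun row => PySem.Str.join "" row))
  | _, _ => ""  -- unreachable under Pre_ (Python raises ValueError)

-- ===== PRECONDITION & SPEC =====
-- Pre_ excludes the empty list, on which Python's max (reached by both A and B) raises ValueError.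
def Pre_render_dotcoords (dotcoords : List (Int × Int)) (emptychar : String) : Prop := dotcoords ≠ []
instance (dotcoords : List (Int × Int)) (emptychar : String) : Decidable (Pre_render_dotcoords dotcoords emptychar) := by unfold Pre_render_dotcoords; infer_instance
def pvWitness_render_dotcoords : (List (Int × Int)) × String := ([(1, 0), (0, 2)], ".")

def Spec_render_dotcoords (dotcoords : List (Int × Int)) (emptychar : String) (out : String) : Prop := out = render_dotcoords_alt dotcoords emptychar
instance (dotcoords : List (Int × Int)) (emptychar : String) (out : String) : Decidable (Spec_render_dotcoords dotcoords emptychar out) := by unfold Spec_render_dotcoords; infer_instance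

-- ===== CLAIM (what is proved, stated in full; the proofs are below) =====
def Claim_equal_render_dotcoords : Prop := ∀ (dotcoords : List (Int × Int)) (emptychar : String), Dom_render_dotcoords dotcoords emptychar → Pre_render_dotcoords dotcoords emptychar → Spec_render_dotcoords dotcoords emptychar (render_dotcoords dotcoords emptychar)

-- ===== LEMMAS AND PROOFS =====

-- one step of B's loop does not change the shape of the grid
theorem gridStep_length (g : List (List String)) (p : Int × Int) :
    (gridStep g p).length = g.length := by
  unfold gridStep; split <;> simp

theorem gridStep_rowlen (g : List (List String)) (p : Int × Int) (j : Nat) :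
    ((gridStep g p).getD j []).length = (g.getD j []).length := by
  unfold gridStep
  split
  · simp only [List.getD_eq_getElem?_getD, List.getElem?_set]
    split_ifs with h1 h2
    · subst h1
      simp [List.getElem?_eq_getElem h2]
    · subst h1
      simp [List.getElem?_eq_none (by omega : g.length ≤ p.2.toNat)]
    · rfl
  · rfl

theorem foldl_gridStep_length (dots : List (Int × Int)) :
    ∀ g : List (List String), (dots.foldl gridStep g).length = g.length := by
  induction dots with
  | nil => intro g; rfl
  | cons p rest ih => intro g; rw [List.foldl_cons, ih, gridStep_length]

theorem foldl_gridStep_rowlen (dots : List (Int × Int)) :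
    ∀ (g : List (List String)) (j : Nat),
      ((dots.foldl gridStep g).getD j []).length = (g.getD j []).length := by
  induction dots with
  | nil => intro g j; rfl
  | cons p rest ih => intro g j; rw [List.foldl_cons, ih, gridStep_rowlen]

-- one step of B's loop, seen at a fixed cell (x, y)
theorem gridStep_cell (g : List (List String)) (p : Int × Int) (x y : Nat) :
    ((gridStep g p).getD y [])[x]? =
      if p = ((x : Int), (y : Int)) ∧ y < g.length ∧ x < (g.getD y []).length
      then some "#" else (g.getD y [])[x]? := by
  obtain ⟨a, b⟩ := p
  unfold gridStep
  by_cases h : 0 ≤ a ∧ 0 ≤ b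
  · rw [if_pos (by simpa using h)]
    by_cases hy : b.toNat = y
    · by_cases hlen : b.toNat < g.length
      · have hrow : (g.set b.toNat ((g.getD b.toNat []).set a.toNat "#")).getD y [] =
            (g.getD b.toNat []).set a.toNat "#" := by
          simp [List.getD_eq_getElem?_getD, hy, hy ▸ hlen]
        rw [hrow, List.getElem?_set, hy]
        by_cases hx : a.toNat = x
        · subst hx
          by_cases hxl : a.toNat < (g.getD y []).length
          · rw [if_pos rfl, if_pos hxl, if_pos]
            refine ⟨?_, by omega, hxl⟩
            have h1 : a = (a.toNat : Int) := by omega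
            have h2 : b = (y : Int) := by omega
            rw [Prod.mk.injEq]
            exact ⟨h1, h2⟩
          · rw [if_pos rfl, if_neg hxl, if_neg]
            · symm; exact List.getElem?_eq_none (by omega)
            · rintro ⟨-, -, hc⟩; omega
        · rw [if_neg hx, if_neg]
          rintro ⟨hp, -, -⟩
          rw [Prod.mk.injEq] at hp
          apply hx; rw [hp.1]; simp
      · -- set out of bounds: no-op; also the row bound in the condition fails
        have hset : g.set b.toNat ((g.getD b.toNat []).set a.toNat "#") = g :=
          List.set_eq_of_length_le (by omega)
        rw [hset, if_neg]
        rintro ⟨hp, hc, -⟩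
        rw [Prod.mk.injEq] at hp
        apply hlen; rw [hp.2]; simpa using hc
    · -- a different row: untouched, and p ≠ (x, y)
      have hrow : (g.set b.toNat ((g.getD b.toNat []).set a.toNat "#")).getD y [] =
          g.getD y [] := by
        simp [List.getD_eq_getElem?_getD, hy]
      rw [hrow, if_neg]
      rintro ⟨hp, -, -⟩
      rw [Prod.mk.injEq] at hp
      apply hy; rw [hp.2]; simp
  · rw [if_neg (by simpa using h), if_neg]
    rintro ⟨hp, -, -⟩
    rw [Prod.mk.injEq] at hp
    apply h
    constructor
    · rw [hp.1]; exact Int.natCast_nonneg x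
    · rw [hp.2]; exact Int.natCast_nonneg y

-- B's whole loop, seen at a fixed cell (x, y)
theorem foldl_gridStep_cell (dots : List (Int × Int)) :
    ∀ (g : List (List String)) (x y : Nat),
      ((dots.foldl gridStep g).getD y [])[x]? =
        if ((x : Int), (y : Int)) ∈ dots ∧ y < g.length ∧ x < (g.getD y []).length
        then some "#" else (g.getD y [])[x]? := by
  induction dots with
  | nil => intro g x y; simp
  | cons p rest ih =>
    intro g x y
    rw [List.foldl_cons, ih, gridStep_length, gridStep_rowlen, gridStep_cell]
    by_cases hb : y < g.length ∧ x < (g.getD y []).length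
    · by_cases hr : ((x : Int), (y : Int)) ∈ rest
      · rw [if_pos ⟨hr, hb⟩, if_pos ⟨List.mem_cons_of_mem _ hr, hb⟩]
      · rw [if_neg (by rintro ⟨hh, -⟩; exact hr hh)]
        by_cases hp : p = ((x : Int), (y : Int))
        · rw [if_pos ⟨hp, hb⟩, if_pos ⟨by rw [hp]; exact List.mem_cons_self .., hb⟩]
        · rw [if_neg (by rintro ⟨hh, -⟩; exact hp hh), if_neg]
          rintro ⟨hh, -⟩
          rcases List.mem_cons.mp hh with h1 | h2
          · exact hp h1.symm
          · exact hr h2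
    · rw [if_neg (by rintro ⟨-, hh⟩; exact hb hh), if_neg (by rintro ⟨-, hh⟩; exact hb hh),
        if_neg (by rintro ⟨-, hh⟩; exact hb hh)]

-- A's outer loop appends one line per y: it is a map
theorem foldl_push {α β : Type} (f : α → β) (l : List α) :
    ∀ acc : List β, l.foldl (fun acc y => acc ++ [f y]) acc = acc ++ l.map f := by
  induction l with
  | nil => intro acc; simp
  | cons a t ih => intro acc; rw [List.foldl_cons, ih]; simp

-- A's inner loop concatenates strings: its character list is a flatten
theorem foldl_strcat {α : Type} (f : α → String) (l : List α) :
    ∀ init : String,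
      (l.foldl (fun s x => s ++ f x) init).toList =
        init.toList ++ (l.map (fun x => (f x).toList)).flatten := by
  induction l with
  | nil => intro init; simp
  | cons a t ih => intro init; rw [List.foldl_cons, ih]; simp [String.toList_append]

-- ''.join is flatten
theorem chars_join_nil_eq_flatten (css : List (List Char)) :
    PySem.Chars.join [] css = css.flatten := by
  induction css with
  | nil => simp [PySem.Chars.join_nil]
  | cons p rest ih =>
    cases rest with
    | nil => simp [PySem.Chars.join_singleton]
    | cons q rs =>
      rw [PySem.Chars.join_cons_cons, ih]
      simp

theorem join_empty_toList (parts : List String) :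
    (PySem.Str.join "" parts).toList = (parts.map String.toList).flatten := by
  rw [PySem.Str.toList_join, show ("" : String).toList = [] from rfl,
    chars_join_nil_eq_flatten]

-- ===== VERDICT (by name: the statement is the Claim_ definition above) =====
theorem render_dotcoords_spec : Claim_equal_render_dotcoords := by
  intro dots ec _hdom hpre
  unfold Pre_render_dotcoords at hpre
  unfold Spec_render_dotcoords
  unfold render_dotcoords render_dotcoords_alt maximums
  cases hx : PySem.List.max? (dots.map (fun p => p.1)) (fun v => v) with
  | none => exact absurd (by simpa using (PySem.List.max?_eq_none_iff _ _).mp hx) hpre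
  | some maxx =>
  cases hy : PySem.List.max? (dots.map (fun p => p.2)) (fun v => v) with
  | none => exact absurd (by simpa using (PySem.List.max?_eq_none_iff _ _).mp hy) hpre
  | some maxy =>
  simp only []
  have hmx : ∀ p ∈ dots, p.1 ≤ maxx := fun p hp =>
    PySem.List.max?_isMax hx p.1 (List.mem_map_of_mem hp)
  have hmy : ∀ p ∈ dots, p.2 ≤ maxy := fun p hp =>
    PySem.List.max?_isMax hy p.2 (List.mem_map_of_mem hp)
  congr 1
  rw [foldl_push]
  simp only [List.nil_append, PySem.List.pyRange_one, Int.sub_zero]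
  have hlen : (dots.foldl gridStep
      (List.replicate (maxy + 1).toNat (List.replicate (maxx + 1).toNat ec))).length =
      (maxy + 1).toNat := by
    rw [foldl_gridStep_length, List.length_replicate]
  have hrowlen : ∀ k : Nat, k < (maxy + 1).toNat →
      ((dots.foldl gridStep
        (List.replicate (maxy + 1).toNat (List.replicate (maxx + 1).toNat ec))).getD k []).length =
      (maxx + 1).toNat := by
    intro k hk
    rw [foldl_gridStep_rowlen, List.getD_replicate _ hk, List.length_replicate]
  have hcell : ∀ k x : Nat, k < (maxy + 1).toNat → x < (maxx + 1).toNat →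
      ((dots.foldl gridStep
        (List.replicate (maxy + 1).toNat (List.replicate (maxx + 1).toNat ec))).getD k [])[x]? =
      some (if ((x : Int), (k : Int)) ∈ dots then "#" else ec) := by
    intro k x hk hxw
    rw [foldl_gridStep_cell]
    simp only [List.length_replicate, List.getD_replicate _ hk]
    by_cases hm : ((x : Int), (k : Int)) ∈ dots
    · rw [if_pos ⟨hm, hk, by simpa using hxw⟩]
      rw [if_pos hm]
    · rw [if_neg (by rintro ⟨hh, -⟩; exact hm hh), if_neg hm, List.getElem?_replicate,
        if_pos hxw]
  apply List.ext_getElem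
  · simp [hlen]
  intro k hk1 hk2
  have hk1' : k < (maxy + 1).toNat := by
    simpa only [List.length_map, List.length_range] using hk1
  simp only [List.getElem_map, List.getElem_range]
  have hrow : (dots.foldl gridStep
      (List.replicate (maxy + 1).toNat (List.replicate (maxx + 1).toNat ec))).getD k [] =
      (List.range (maxx + 1).toNat).map
        (fun x : Nat => if ((x : Int), (k : Int)) ∈ dots then "#" else ec) := by
    apply List.ext_getElem?
    intro x
    by_cases hxw : x < (maxx + 1).toNat
    · rw [hcell k x hk1' hxw, List.getElem?_map, List.getElem?_range hxw]
      rfl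
    · rw [List.getElem?_eq_none (by rw [hrowlen k hk1']; omega),
        List.getElem?_eq_none (by simpa using (by omega : (maxx + 1).toNat ≤ x))]
  have hrowget : (dots.foldl gridStep
      (List.replicate (maxy + 1).toNat (List.replicate (maxx + 1).toNat ec)))[k]'(by rw [hlen]; exact hk1') =
      (List.range (maxx + 1).toNat).map
        (fun x : Nat => if ((x : Int), (k : Int)) ∈ dots then "#" else ec) := by
    rw [← hrow, List.getD_eq_getElem?_getD,
      List.getElem?_eq_getElem (by rw [hlen]; exact hk1'), Option.getD_some]
  apply String.toList_inj.mp
  rw [foldl_strcat, join_empty_toList, hrowget,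
    show ("" : String).toList = [] from rfl, List.nil_append, List.map_map, List.map_map]
  congr 1
  apply List.map_congr_left
  intro x _
  simp
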